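-- pv_equiv track=rewrite | github.com/angary/protein-folding-sat | get_sequences.py | get_binary_sequence
-- ===== SOURCE A (Python) =====
-- def get_binary_sequence(amino_acid_sequence: str) -> str:
--     ONES = ['A', 'C', 'G', 'I', 'L', 'M', 'F', 'P', 'W', 'Y', 'V']
--     ZEROS = ['R', 'N', 'D', 'Q', 'E', 'H', 'K', 'S', 'T']
--
--     sequence = ""
--
--     for x in amino_acid_sequence:
--         if x in ONES:
--             sequence += "1"
--         elif x in ZEROS:
--             sequence += "0"
--         else:
--             raise Exception("ERROR: invalid character in sequence: {x}")
--
--     return sequence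
-- ===== SOURCE B (Python) =====
-- _ONES = "ACGILMFPWYV"
-- _ZEROS = "RNDQEHKST"
-- _TABLE = str.maketrans(dict.fromkeys(_ONES, "1") | dict.fromkeys(_ZEROS, "0"))
-- _VALID = set(_ONES + _ZEROS)
--
-- def get_binary_sequence(amino_acid_sequence: str) -> str:
--     for x in amino_acid_sequence:
--         if x not in _VALID:
--             raise Exception("ERROR: invalid character in sequence: {x}")
--     return amino_acid_sequence.translate(_TABLE)
-- ===== Notes on version B (the rewrite author's own statement) =====
-- stated objective: idiomatic
-- what changed: Replaced the per-character branch-and-concatenate loop with a separate validation pass followed by a single str.translate over a fixed translation table.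
import Mathlib
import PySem

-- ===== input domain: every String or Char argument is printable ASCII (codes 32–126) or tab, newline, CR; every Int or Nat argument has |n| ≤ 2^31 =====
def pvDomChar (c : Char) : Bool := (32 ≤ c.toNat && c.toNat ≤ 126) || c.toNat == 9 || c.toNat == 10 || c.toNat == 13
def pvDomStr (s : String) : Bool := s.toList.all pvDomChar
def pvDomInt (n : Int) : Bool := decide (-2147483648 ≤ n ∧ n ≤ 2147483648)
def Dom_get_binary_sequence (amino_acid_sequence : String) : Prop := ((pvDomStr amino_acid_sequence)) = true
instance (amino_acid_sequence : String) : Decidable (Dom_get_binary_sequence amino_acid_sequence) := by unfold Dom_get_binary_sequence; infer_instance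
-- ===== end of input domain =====

-- B validates the whole string first, then maps it through a fixed translation table
-- (str.translate) instead of A's per-character branch-and-concatenate loop; objective: idiomatic.


-- ===== PORT A =====
def pvONES : List Char := ['A', 'C', 'G', 'I', 'L', 'M', 'F', 'P', 'W', 'Y', 'V']
def pvZEROS : List Char := ['R', 'N', 'D', 'Q', 'E', 'H', 'K', 'S', 'T']

-- A's loop: branch per character, appending to the accumulated string.
-- On an invalid character Python raises (excluded by Pre_); the port keeps the accumulator there.
def get_binary_sequence (amino_acid_sequence : String) : String :=
  amino_acid_sequence.toList.foldl
    (fun sequence x =>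
      if x ∈ pvONES then sequence ++ "1"
      else if x ∈ pvZEROS then sequence ++ "0"
      else sequence) ""

-- ===== PORT B =====
def pvONESs : List Char := "ACGILMFPWYV".toList
def pvZEROSs : List Char := "RNDQEHKST".toList
def pvValid : List Char := pvONESs ++ pvZEROSs
def pvTable (c : Char) : Char := if pvONESs.contains c then '1' else '0'

-- B: validation pass (Python raises on failure — excluded by Pre_), then a whole-string translate.
def get_binary_sequence_alt (amino_acid_sequence : String) : String :=
  String.ofList (amino_acid_sequence.toList.map pvTable)

-- ===== PRECONDITION & SPEC =====
-- Pre_ excludes exactly the inputs on which Python A raises: a character outside the 20 valid letters.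
def Pre_get_binary_sequence (amino_acid_sequence : String) : Prop :=
  (amino_acid_sequence.toList.all (fun c => pvValid.contains c)) = true
instance (amino_acid_sequence : String) : Decidable (Pre_get_binary_sequence amino_acid_sequence) := by
  unfold Pre_get_binary_sequence; infer_instance
def pvWitness_get_binary_sequence : String := "ACRN"

def Spec_get_binary_sequence (amino_acid_sequence : String) (out : String) : Prop := out = get_binary_sequence_alt amino_acid_sequence
instance (amino_acid_sequence : String) (out : String) : Decidable (Spec_get_binary_sequence amino_acid_sequence out) := by unfold Spec_get_binary_sequence; infer_instance

-- ===== CLAIM (what is proved, stated in full; the proofs are below) =====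
def Claim_equal_get_binary_sequence : Prop := ∀ (amino_acid_sequence : String), Dom_get_binary_sequence amino_acid_sequence → Pre_get_binary_sequence amino_acid_sequence → Spec_get_binary_sequence amino_acid_sequence (get_binary_sequence amino_acid_sequence)

-- ===== LEMMAS AND PROOFS =====
theorem pvONESs_eq : pvONESs = pvONES := rfl
theorem pvZEROSs_eq : pvZEROSs = pvZEROS := rfl

theorem pv_foldl_map (l : List Char) (acc : List Char)
    (h : ∀ c ∈ l, c ∈ pvValid) :
    l.foldl
      (fun (sequence : String) x =>
        if x ∈ pvONES then sequence ++ "1"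
        else if x ∈ pvZEROS then sequence ++ "0"
        else sequence) (String.ofList acc)
      = String.ofList (acc ++ l.map pvTable) := by
  induction l generalizing acc with
  | nil => simp
  | cons x xs ih =>
      have hx : x ∈ pvValid := h x (List.mem_cons_self)
      have hxs : ∀ c ∈ xs, c ∈ pvValid := fun c hc => h c (List.mem_cons_of_mem _ hc)
      simp only [List.foldl_cons]
      by_cases h1 : x ∈ pvONES
      · have : (String.ofList acc) ++ "1" = String.ofList (acc ++ ['1']) := by
          apply String.toList_injective; simp
        rw [if_pos h1, this, ih _ hxs]
        simp [pvTable, pvONESs_eq, h1]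
      · have h0 : x ∈ pvZEROS := by
          rcases List.mem_append.mp (by simpa [pvValid, pvONESs_eq, pvZEROSs_eq] using hx)
            with h' | h'
          · exact absurd h' h1
          · exact h'
        have : (String.ofList acc) ++ "0" = String.ofList (acc ++ ['0']) := by
          apply String.toList_injective; simp
        rw [if_neg h1, if_pos h0, this, ih _ hxs]
        simp [pvTable, pvONESs_eq, h1]

-- ===== VERDICT (by name: the statement is the Claim_ definition above) =====
theorem get_binary_sequence_spec : Claim_equal_get_binary_sequence := by
  intro s _ hpre
  have hpre : ∀ c ∈ s.toList, c ∈ pvValid := by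
    intro c hc
    simpa using List.all_eq_true.mp hpre c hc
  unfold Spec_get_binary_sequence get_binary_sequence get_binary_sequence_alt
  have := pv_foldl_map s.toList [] hpre
  simpa using this
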